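-- pv_equiv track=rewrite | github.com/codev1129/CS204proj | RISC-V_Simulator_Group_4.py | srl
-- ===== SOURCE A (Python) =====
-- def srl(s1,s2):
--     # s1 , s2 in int
--     if (s1>=0):
--         return s1>>s2
--     temp=bin(s1)[3:]
--     temp='0'*(32-len(temp))+temp # 32 bit positive of the number
--     temp1='0b'
--     for i in temp:
--         temp1+=str(1^int(i))
--     temp1=int(temp1,2)+1
--     return temp1>>s2
-- ===== SOURCE B (Python) =====
-- def srl(s1, s2):
--     if s1 >= 0:
--         return s1 >> s2
--     n = -s1
--     w = max(32, n.bit_length())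
--     return ((1 << w) - n) >> s2
-- ===== Notes on version B (the rewrite author's own statement) =====
-- stated objective: idiomatic
-- what changed: The negative branch's 32-iteration bit-string build/invert/parse loop is replaced by closed-form integer arithmetic: the two's complement ((1 << max(32, n.bit_length())) - n) >> s2.
import Mathlib
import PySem

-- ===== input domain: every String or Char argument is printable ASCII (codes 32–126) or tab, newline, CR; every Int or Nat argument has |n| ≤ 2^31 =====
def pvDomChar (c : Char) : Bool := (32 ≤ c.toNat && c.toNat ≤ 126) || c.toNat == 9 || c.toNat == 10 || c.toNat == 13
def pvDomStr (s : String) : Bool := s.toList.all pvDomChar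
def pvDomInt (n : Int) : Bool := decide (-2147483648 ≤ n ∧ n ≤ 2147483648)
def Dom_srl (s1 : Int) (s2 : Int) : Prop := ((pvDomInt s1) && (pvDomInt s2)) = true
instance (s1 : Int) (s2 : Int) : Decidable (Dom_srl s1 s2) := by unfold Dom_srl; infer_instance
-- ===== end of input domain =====

-- B replaces A's 32-iteration bit-string build/invert/parse loop for negative inputs
-- by the closed-form two's complement ((1 <<< max 32 bitlen) - n) >>> s2 (objective: idiomatic).

-- ===== PORT A =====
-- digit characters of bin(n) (for n = 0 this is [], matching bin(-0) never being reached)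
def pvBinChars (n : Nat) : List Char :=
  if h : n = 0 then [] else pvBinChars (n / 2) ++ [if n % 2 == 1 then '1' else '0']
decreasing_by exact Nat.div_lt_self (Nat.pos_of_ne_zero h) (by norm_num)

-- int(i) for a binary digit character
def pvDigit (c : Char) : Nat := if c == '1' then 1 else 0

def srl (s1 : Int) (s2 : Int) : Int :=
  if s1 ≥ 0 then s1 >>> s2.toNat
  else
    let temp := pvBinChars (-s1).toNat
    let temp := List.replicate (32 - temp.length) '0' ++ temp
    let temp1 := temp.foldl (fun acc c => acc ++ [if (1 ^^^ pvDigit c) == 1 then '1' else '0']) []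
    let t := temp1.foldl (fun acc c => 2 * acc + pvDigit c) 0 + 1
    (t : Int) >>> s2.toNat

-- ===== PORT B =====
-- n.bit_length()
def pvBitLen (n : Nat) : Nat :=
  if h : n = 0 then 0 else pvBitLen (n / 2) + 1
decreasing_by exact Nat.div_lt_self (Nat.pos_of_ne_zero h) (by norm_num)

def srl_alt (s1 : Int) (s2 : Int) : Int :=
  if s1 ≥ 0 then s1 >>> s2.toNat
  else
    let n := (-s1).toNat
    let w := max 32 (pvBitLen n)
    (((1 : Int) <<< w) - (n : Int)) >>> s2.toNat

-- ===== PRECONDITION & SPEC =====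
-- Pre_ excludes s2 < 0, on which Python's '>>' raises ValueError in both A and B.
def Pre_srl (s1 : Int) (s2 : Int) : Prop := 0 ≤ s2
instance (s1 : Int) (s2 : Int) : Decidable (Pre_srl s1 s2) := by unfold Pre_srl; infer_instance
def pvWitness_srl : Int × Int := (-5, 1)

def Spec_srl (s1 : Int) (s2 : Int) (out : Int) : Prop := out = srl_alt s1 s2
instance (s1 : Int) (s2 : Int) (out : Int) : Decidable (Spec_srl s1 s2 out) := by unfold Spec_srl; infer_instance

-- ===== CLAIM =====
def Claim_equal_srl : Prop := ∀ (s1 : Int) (s2 : Int), Dom_srl s1 s2 → Pre_srl s1 s2 → Spec_srl s1 s2 (srl s1 s2)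

-- ===== LEMMAS AND PROOFS =====

def pvParse (l : List Char) : Nat := l.foldl (fun acc c => 2 * acc + pvDigit c) 0

theorem pvParse_foldl (l : List Char) (a : Nat) :
    l.foldl (fun acc c => 2 * acc + pvDigit c) a = a * 2 ^ l.length + pvParse l := by
  induction l generalizing a with
  | nil => simp [pvParse]
  | cons c l ih =>
    simp only [List.foldl_cons, List.length_cons]
    rw [ih]
    have h2 : pvParse (c :: l) = pvDigit c * 2 ^ l.length + pvParse l := by
      unfold pvParse
      simp only [List.foldl_cons, Nat.mul_zero, Nat.zero_add]
      rw [ih]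
      rfl
    rw [h2]
    ring

theorem pvParse_append (l1 l2 : List Char) :
    pvParse (l1 ++ l2) = pvParse l1 * 2 ^ l2.length + pvParse l2 := by
  unfold pvParse
  rw [List.foldl_append, pvParse_foldl]
  rfl

theorem pvDigit_le_one (c : Char) : pvDigit c ≤ 1 := by
  unfold pvDigit; split <;> omega

theorem pvParse_lt (l : List Char) : pvParse l < 2 ^ l.length := by
  induction l using List.reverseRecOn with
  | nil => simp [pvParse]
  | append_singleton l c ih =>
    rw [pvParse_append]
    have := pvDigit_le_one c
    simp only [List.length_append, List.length_cons, List.length_nil, pow_add]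
    simp [pvParse, pvDigit] at *
    omega

-- the inverting loop is a map
theorem pvInvert_foldl (l : List Char) (a : List Char) :
    l.foldl (fun acc c => acc ++ [if (1 ^^^ pvDigit c) == 1 then '1' else '0']) a
      = a ++ l.map (fun c => if (1 ^^^ pvDigit c) == 1 then '1' else '0') := by
  induction l generalizing a with
  | nil => simp
  | cons c l ih => rw [List.foldl_cons, ih]; simp

theorem pvDigit_flip (c : Char) :
    pvDigit (if (1 ^^^ pvDigit c) == 1 then '1' else '0') = 1 - pvDigit c := by
  unfold pvDigit; split <;> split <;> simp_all

theorem pvParse_map_flip (l : List Char) :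
    pvParse (l.map (fun c => if (1 ^^^ pvDigit c) == 1 then '1' else '0')) =
      2 ^ l.length - 1 - pvParse l := by
  induction l using List.reverseRecOn with
  | nil => simp [pvParse]
  | append_singleton l c ih =>
    rw [List.map_append, pvParse_append, pvParse_append, ih]
    have h1 := pvParse_lt l
    have h2 := pvDigit_le_one c
    have h3 := pvDigit_flip c
    simp only [List.map_cons, List.map_nil, List.length_map, List.length_cons,
      List.length_nil, pow_add]
    simp [pvParse] at *
    omega

theorem pvParse_replicate_zero (k : Nat) : pvParse (List.replicate k '0') = 0 := by
  induction k with
  | zero => simp [pvParse]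
  | succ k ih =>
    rw [List.replicate_succ', pvParse_append, ih]
    simp [pvParse, pvDigit]

theorem pvBinChars_length (n : Nat) : (pvBinChars n).length = pvBitLen n := by
  induction n using Nat.strong_induction_on with
  | _ n ih =>
    unfold pvBinChars pvBitLen
    split
    · simp
    · rename_i h
      simp [ih (n / 2) (Nat.div_lt_self (Nat.pos_of_ne_zero h) (by norm_num))]

theorem pvParse_pvBinChars (n : Nat) : pvParse (pvBinChars n) = n := by
  induction n using Nat.strong_induction_on with
  | _ n ih =>
    unfold pvBinChars
    split
    · simp [pvParse]; omega
    · rename_i h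
      rw [pvParse_append, ih (n / 2) (Nat.div_lt_self (Nat.pos_of_ne_zero h) (by norm_num))]
      rcases Nat.mod_two_eq_zero_or_one n with h2 | h2 <;>
        simp [pvParse, pvDigit, h2] <;> omega

theorem pvBitLen_le (n k : Nat) (h : n < 2 ^ k) : pvBitLen n ≤ k := by
  induction n using Nat.strong_induction_on generalizing k with
  | _ n ih =>
    unfold pvBitLen
    split
    · omega
    · rename_i hn
      cases k with
      | zero => omega
      | succ k =>
        have : n / 2 < 2 ^ k := by
          rw [pow_succ] at h; omega
        have := ih (n / 2) (Nat.div_lt_self (Nat.pos_of_ne_zero hn) (by norm_num)) k this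
        omega

-- ===== VERDICT =====
theorem srl_spec : Claim_equal_srl := by
  intro s1 s2 hdom _
  unfold Spec_srl srl srl_alt
  split
  · rfl
  · rename_i hneg
    simp only []
    have hn1 : 1 ≤ (-s1).toNat := by omega
    have hn2 : (-s1).toNat ≤ 2 ^ 31 := by
      simp [Dom_srl, pvDomInt] at hdom
      omega
    set n := (-s1).toNat with hn
    -- the bit string has length exactly 32
    have hblen : (pvBinChars n).length ≤ 32 := by
      rw [pvBinChars_length]
      exact pvBitLen_le n 32 (lt_of_le_of_lt hn2 (by norm_num))
    have hw : max 32 (pvBitLen n) = 32 := by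
      rw [pvBinChars_length] at hblen; omega
    rw [hw]
    have hlen : (List.replicate (32 - (pvBinChars n).length) '0' ++ pvBinChars n).length = 32 := by
      simp; omega
    -- value of the inversion + 1
    have hparse : pvParse (List.replicate (32 - (pvBinChars n).length) '0' ++ pvBinChars n) = n := by
      rw [pvParse_append, pvParse_replicate_zero, pvParse_pvBinChars]; simp
    rw [pvInvert_foldl]
    have := pvParse_map_flip (List.replicate (32 - (pvBinChars n).length) '0' ++ pvBinChars n)
    rw [hparse, hlen] at this
    have hfold : (List.map (fun c => if (1 ^^^ pvDigit c) == 1 then '1' else '0')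
        (List.replicate (32 - (pvBinChars n).length) '0' ++ pvBinChars n)).foldl
        (fun acc c => 2 * acc + pvDigit c) 0 = 2 ^ 32 - 1 - n := by
      simpa [pvParse] using this
    rw [List.nil_append, hfold]
    have hval : ((2 ^ 32 - 1 - n + 1 : Nat) : Int) = (1 : Int) <<< 32 - (n : Int) := by
      have h32 : (1 : Int) <<< 32 = 4294967296 := by decide
      rw [h32]
      omega
    rw [hval]
    rfl
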